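-- pv_equiv track=rewrite | github.com/AishwaryaRK/Code | TopCoder/TC/src/target1/CodeGladiator1.py | GetJumpCount
-- ===== SOURCE A (Python) =====
-- def GetJumpCount(input1, input2, input3):
--     cnt = 0
--     for n in input3:
--         if input1 >= n:
--             cnt += 1
--         else:
--             h = input1
--             cnt += 1
--             while h < n:
--                 h += input1 - input2
--                 cnt += 1
--     return cnt
-- ===== SOURCE B (Python) =====
-- def GetJumpCount(input1, input2, input3):
--     step = input1 - input2
--     return sum(1 if n <= input1 else 1 - (input1 - n) // step for n in input3)
-- ===== Notes on version B (the rewrite author's own statement) =====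
-- stated objective: faster
-- what changed: Replaces the per-target simulation loop (incrementing h by the step until it reaches n) with a closed-form ceiling-division count per element, summed in one pass.
import Mathlib
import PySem

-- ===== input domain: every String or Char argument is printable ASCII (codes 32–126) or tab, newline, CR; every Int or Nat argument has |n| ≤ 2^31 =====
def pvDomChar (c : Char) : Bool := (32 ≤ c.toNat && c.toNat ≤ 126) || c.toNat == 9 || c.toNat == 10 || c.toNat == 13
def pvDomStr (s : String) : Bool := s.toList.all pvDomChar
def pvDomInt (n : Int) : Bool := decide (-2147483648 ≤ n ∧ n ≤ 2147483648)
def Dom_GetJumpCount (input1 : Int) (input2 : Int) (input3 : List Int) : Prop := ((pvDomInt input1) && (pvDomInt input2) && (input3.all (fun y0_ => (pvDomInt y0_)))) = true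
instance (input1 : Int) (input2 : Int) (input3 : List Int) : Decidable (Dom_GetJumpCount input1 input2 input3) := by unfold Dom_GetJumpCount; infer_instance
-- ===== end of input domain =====

-- B replaces A's per-target step-by-step simulation by a closed-form ceiling division per element (faster).

-- ===== PORT A =====
-- the inner 'while h < n: h += step; cnt += 1' loop; the '0 < step' guard only
-- ensures totality: when step ≤ 0 and h < n the Python loop diverges (outside Pre_)
def loopA (step n h : Int) : Int :=
  if _ : h < n then
    if _ : 0 < step then 1 + loopA step n (h + step) else 0
  else 0
termination_by (n - h).toNat
decreasing_by omega

def GetJumpCount (input1 : Int) (input2 : Int) (input3 : List Int) : Int :=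
  input3.foldl (fun cnt n =>
    if input1 ≥ n then cnt + 1
    else cnt + 1 + loopA (input1 - input2) n input1) 0

-- ===== PORT B =====
def GetJumpCount_alt (input1 : Int) (input2 : Int) (input3 : List Int) : Int :=
  (input3.map (fun n =>
    if n ≤ input1 then (1 : Int)
    else 1 - PySem.Int.floordiv (input1 - n) (input1 - input2))).sum

-- ===== PRECONDITION & SPEC =====
-- Pre_ excludes exactly the inputs where Python A diverges: some target exceeds
-- input1 while the step input1 - input2 is not positive.
def Pre_GetJumpCount (input1 : Int) (input2 : Int) (input3 : List Int) : Prop :=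
  ∀ n ∈ input3, n ≤ input1 ∨ input2 < input1
instance (input1 : Int) (input2 : Int) (input3 : List Int) : Decidable (Pre_GetJumpCount input1 input2 input3) := by unfold Pre_GetJumpCount; infer_instance

def pvWitness_GetJumpCount : Int × Int × List Int := (3, 1, [5, 2, 10])

def Spec_GetJumpCount (input1 : Int) (input2 : Int) (input3 : List Int) (out : Int) : Prop := out = GetJumpCount_alt input1 input2 input3
instance (input1 : Int) (input2 : Int) (input3 : List Int) (out : Int) : Decidable (Spec_GetJumpCount input1 input2 input3 out) := by unfold Spec_GetJumpCount; infer_instance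

-- ===== CLAIM (what is proved, stated in full; the proofs are below) =====
def Claim_equal_GetJumpCount : Prop := ∀ (input1 : Int) (input2 : Int) (input3 : List Int), Dom_GetJumpCount input1 input2 input3 → Pre_GetJumpCount input1 input2 input3 → Spec_GetJumpCount input1 input2 input3 (GetJumpCount input1 input2 input3)

-- ===== LEMMAS AND PROOFS =====

theorem loopA_eq (step n : Int) (hs : 0 < step) (h : Int) :
    loopA step n h = if h < n then -(PySem.Int.floordiv (h - n) step) else 0 := by
  fun_induction loopA step n h with
  | case1 h hlt hs' ih =>
    rw [ih, if_pos hlt]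
    simp only [PySem.Int.floordiv_eq_ediv_of_pos hs]
    by_cases h2 : h + step < n
    · rw [if_pos h2]
      have heq : h - n = (h + step - n) + (-1) * step := by ring
      rw [heq, Int.add_mul_ediv_right _ _ (by omega : step ≠ 0)]
      ring
    · rw [if_neg h2]
      have hz : (h - n + step) / step = 0 := Int.ediv_eq_zero_of_lt (by omega) (by omega)
      have heq : h - n = (h - n + step) + (-1) * step := by ring
      rw [heq, Int.add_mul_ediv_right _ _ (by omega : step ≠ 0), hz]
      norm_num
  | case2 h hlt hs' =>
    exact absurd hs hs'
  | case3 h hge =>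
    simp [hge]

theorem fold_eq (input1 input2 : Int) (l : List Int)
    (hp : ∀ n ∈ l, n ≤ input1 ∨ input2 < input1) (acc : Int) :
    l.foldl (fun cnt n =>
      if input1 ≥ n then cnt + 1
      else cnt + 1 + loopA (input1 - input2) n input1) acc
    = acc + (l.map (fun n =>
        if n ≤ input1 then (1 : Int)
        else 1 - PySem.Int.floordiv (input1 - n) (input1 - input2))).sum := by
  induction l generalizing acc with
  | nil => simp
  | cons n t ih =>
    simp only [List.foldl_cons, List.map_cons, List.sum_cons]
    rw [ih (fun m hm => hp m (List.mem_cons_of_mem _ hm))]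
    by_cases hn : n ≤ input1
    · simp only [hn, if_pos]
      ring
    · have hstep : 0 < input1 - input2 := by
        rcases hp n (List.mem_cons_self) with h | h
        · omega
        · omega
      simp only [ge_iff_le, hn, if_neg, not_false_iff]
      rw [loopA_eq _ _ hstep]
      simp only [show input1 < n by omega, if_pos]
      ring

-- ===== VERDICT (by name: the statement is the Claim_ definition above) =====
theorem GetJumpCount_spec : Claim_equal_GetJumpCount := by
  intro input1 input2 input3 _ hpre
  unfold Spec_GetJumpCount GetJumpCount GetJumpCount_alt
  rw [fold_eq input1 input2 input3 hpre 0]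
  ring
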